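-- pv_equiv track=rewrite | github.com/khaidarovs/slackbot | bot.py | compute_time_format
-- ===== SOURCE A (Python) =====
-- def is_time_format_valid(time_format):
--     t_len = len(time_format)
--     if t_len == 0:
--         return False
--     has_number = False
--     for i in range(t_len):
--         if time_format[i] == '-':
--             if i + 1 < t_len and time_format[i + 1].isnumeric():
--                 return False # Existence of negative number in time format.
--         if time_format[i].isnumeric():
--             has_number = True
--     return has_number
--
-- def compute_time_format(time_format):
--     if is_time_format_valid(time_format) == False:
--         # Return negative number since it would be invalid when returning the
--         # time from now. Time from now needs to be a nonzero positive number.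
--         return -1
--     # Concatenate numerical characters into a string, until a non-numerical
--     # character is reached.
--     total_time_sec = 0
--     last_num_as_string = "0"
--     for i in range(len(time_format)):
--         if time_format[i].isnumeric():
--             last_num_as_string += time_format[i]
--         else:
--             time_part = int(last_num_as_string)
--             if time_format[i] == 'd':
--                 total_time_sec += (time_part * 86400)
--             elif time_format[i] == 'h':
--                 total_time_sec += (time_part * 3600)
--             elif time_format[i] == 's':
--                 total_time_sec += time_part
--             else:
--                 total_time_sec += (time_part * 60) # Assume minutes
--             last_num_as_string = "0"
--     if last_num_as_string != "0": # Number with no unit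
--         time_part = int(last_num_as_string)
--         total_time_sec += (time_part * 60)
--     return total_time_sec
-- ===== SOURCE B (Python) =====
-- from itertools import groupby
--
-- _MULT = {'d': 86400, 'h': 3600, 's': 1}
--
-- def compute_time_format(time_format):
--     s = time_format
--     if not any(c.isnumeric() for c in s) or any(
--             a == '-' and b.isnumeric() for a, b in zip(s, s[1:])):
--         return -1
--     total = 0
--     pending = 0
--     for is_num, run in groupby(s, key=str.isnumeric):
--         chars = ''.join(run)
--         if is_num:
--             pending = int('0' + chars)
--         else:
--             total += pending * _MULT.get(chars[0], 60)
--             pending = 0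
--     return total + pending * 60
-- ===== Notes on version B (the rewrite author's own statement) =====
-- stated objective: alternative
-- what changed: B tokenizes the string into maximal numeric/non-numeric runs (itertools.groupby) and keeps an integer pending value flushed once per run, and replaces the helper's index loop with zip-based adjacency and any() checks, instead of A's per-character string accumulator with repeated int() parsing.
import Mathlib
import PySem

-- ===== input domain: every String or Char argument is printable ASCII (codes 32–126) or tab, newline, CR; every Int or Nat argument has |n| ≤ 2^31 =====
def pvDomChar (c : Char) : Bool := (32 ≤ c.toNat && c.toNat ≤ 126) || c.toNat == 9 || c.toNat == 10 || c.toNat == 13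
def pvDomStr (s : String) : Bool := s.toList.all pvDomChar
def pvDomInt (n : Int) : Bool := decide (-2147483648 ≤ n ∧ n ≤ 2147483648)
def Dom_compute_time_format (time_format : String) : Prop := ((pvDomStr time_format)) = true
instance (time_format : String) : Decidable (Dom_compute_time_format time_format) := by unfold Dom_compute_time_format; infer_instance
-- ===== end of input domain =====

-- B parses the string as alternating numeric/non-numeric runs (itertools.groupby) with one
-- pending value, instead of A's char-by-char string accumulator; objective: alternative/simpler.
-- On the ASCII domain str.isnumeric == Char.isDigit and int() on digit strings never raises,
-- so both ports use Char.isDigit and a digit fold for int() (exact on every reachable string).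

-- ===== PORT A =====
-- exact port of Python int() on strings of decimal digits (the only strings A/B ever convert)
def pyIntDigits (l : List Char) : Int :=
  l.foldl (fun a c => 10 * a + ((c.toNat : Int) - 48)) 0

def validAux : List Char → Bool → Bool
  | [], hasNum => hasNum
  | c :: rest, hasNum =>
    if c == '-' && (rest.head?.any Char.isDigit) then false
    else validAux rest (hasNum || c.isDigit)

def is_time_format_valid (time_format : String) : Bool :=
  if time_format.toList.length = 0 then false else validAux time_format.toList false

def ctfLoop : List Char → Int → List Char → Int × List Char
  | [], total, last => (total, last)
  | c :: rest, total, last =>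
    if c.isDigit then ctfLoop rest total (last ++ [c])
    else
      let tp := pyIntDigits last
      let add := if c = 'd' then tp * 86400
                 else if c = 'h' then tp * 3600
                 else if c = 's' then tp
                 else tp * 60
      ctfLoop rest (total + add) ['0']

def compute_time_format (time_format : String) : Int :=
  if is_time_format_valid time_format = false then -1
  else if (ctfLoop time_format.toList 0 ['0']).2 ≠ ['0'] then
    (ctfLoop time_format.toList 0 ['0']).1
      + pyIntDigits (ctfLoop time_format.toList 0 ['0']).2 * 60
  else (ctfLoop time_format.toList 0 ['0']).1

-- ===== PORT B =====
-- itertools.groupby(s, key=str.isnumeric): maximal runs with their key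
def pyRuns : List Char → List (Bool × List Char)
  | [] => []
  | c :: rest =>
    let b := c.isDigit
    (b, c :: rest.takeWhile (fun d => d.isDigit = b)) ::
      pyRuns (rest.dropWhile (fun d => d.isDigit = b))
termination_by l => l.length
decreasing_by
  exact Nat.lt_succ_of_le (List.length_dropWhile_le _ _)

def runStep (st : Int × Int) (r : Bool × List Char) : Int × Int :=
  if r.1 then (st.1, pyIntDigits ('0' :: r.2))
  else (st.1 + st.2 * (if r.2.head? = some 'd' then 86400
                       else if r.2.head? = some 'h' then 3600
                       else if r.2.head? = some 's' then 1 else 60), 0)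

def compute_time_format_alt (time_format : String) : Int :=
  if !(time_format.toList.any Char.isDigit)
      || ((time_format.toList.zip time_format.toList.tail).any
            fun p => p.1 = '-' ∧ p.2.isDigit) then -1
  else ((pyRuns time_format.toList).foldl runStep (0, 0)).1
    + ((pyRuns time_format.toList).foldl runStep (0, 0)).2 * 60

-- ===== PRECONDITION & SPEC =====
def Spec_compute_time_format (time_format : String) (out : Int) : Prop := out = compute_time_format_alt time_format
instance (time_format : String) (out : Int) : Decidable (Spec_compute_time_format time_format out) := by unfold Spec_compute_time_format; infer_instance

-- ===== CLAIM (what is proved, stated in full; the proofs are below) =====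
def Claim_equal_compute_time_format : Prop := ∀ (time_format : String), Dom_compute_time_format time_format → Spec_compute_time_format time_format (compute_time_format time_format)

-- ===== LEMMAS AND PROOFS =====

-- common reference loop: char-by-char, state (total, pending)
def specLoop : List Char → Int → Int → Int
  | [], total, pending => total + pending * 60
  | c :: rest, total, pending =>
    if c.isDigit then specLoop rest total (10 * pending + ((c.toNat : Int) - 48))
    else specLoop rest
      (total + pending * (if c = 'd' then 86400 else if c = 'h' then 3600
                          else if c = 's' then 1 else 60)) 0

-- validity: A's loop equals B's boolean condition
def badAdj : List Char → Bool
  | [] => false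
  | [_] => false
  | c :: d :: rest => (decide (c = '-' ∧ d.isDigit)) || badAdj (d :: rest)

lemma zip_tail_eq_badAdj (l : List Char) :
    ((l.zip l.tail).any fun p => p.1 = '-' ∧ p.2.isDigit) = badAdj l := by
  match l with
  | [] => rfl
  | [_] => rfl
  | c :: d :: rest =>
    simp only [List.tail_cons, List.zip_cons_cons, List.any_cons, badAdj]
    rw [← zip_tail_eq_badAdj (d :: rest)]
    simp

lemma beq_dash_and (c d : Char) :
    (c == '-' && d.isDigit) = decide (c = '-' ∧ d.isDigit) := by
  by_cases h : c = '-' <;> simp [h]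

lemma validAux_eq (l : List Char) (h : Bool) :
    validAux l h = ((h || l.any Char.isDigit) && !badAdj l) := by
  induction l generalizing h with
  | nil => simp [validAux, badAdj]
  | cons c rest ih =>
    rw [validAux]
    match rest with
    | [] =>
      rw [if_neg (by simp), ih]
      simp [badAdj]
    | d :: t =>
      rw [show ((d :: t).head?.any Char.isDigit) = d.isDigit from rfl, beq_dash_and]
      by_cases hb : decide (c = '-' ∧ d.isDigit) = true
      · rw [if_pos hb]
        simp [badAdj, hb]
      · rw [if_neg hb, ih]
        simp only [badAdj, List.any_cons,
          Bool.eq_false_iff.mpr hb, Bool.false_or]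
        rw [Bool.or_assoc]

lemma valid_eq (s : String) :
    is_time_format_valid s
      = !((!(s.toList.any Char.isDigit))
          || ((s.toList.zip s.toList.tail).any fun p => p.1 = '-' ∧ p.2.isDigit)) := by
  unfold is_time_format_valid
  rw [zip_tail_eq_badAdj, validAux_eq]
  match h : s.toList with
  | [] => simp [badAdj]
  | c :: t => simp

-- A's loop equals the reference loop
lemma pyIntDigits_append (l : List Char) (c : Char) :
    pyIntDigits (l ++ [c]) = 10 * pyIntDigits l + ((c.toNat : Int) - 48) := by
  simp [pyIntDigits, List.foldl_append]

lemma ctfLoop_eq_spec (l : List Char) (total : Int) (last : List Char) :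
    (ctfLoop l total last).1 + pyIntDigits (ctfLoop l total last).2 * 60
      = specLoop l total (pyIntDigits last) := by
  induction l generalizing total last with
  | nil => rfl
  | cons c rest ih =>
    rw [ctfLoop, specLoop]
    by_cases hc : c.isDigit
    · rw [if_pos hc, if_pos hc, ih, pyIntDigits_append]
    · rw [if_neg hc, if_neg hc, ih]
      have h0 : pyIntDigits ['0'] = 0 := by decide
      rw [h0]
      congr 1
      by_cases h1 : c = 'd' <;> by_cases h2 : c = 'h' <;> by_cases h3 : c = 's' <;>
        simp [h1, h2, h3]

-- pending = 0 clears a non-digit prefix in the reference loop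
lemma specLoop_nondigit (m : List Char) (rest : List Char) (total : Int)
    (hm : ∀ c ∈ m, c.isDigit = false) :
    specLoop (m ++ rest) total 0 = specLoop rest total 0 := by
  induction m with
  | nil => rfl
  | cons c t ih =>
    have hc : c.isDigit = false := hm c (by simp)
    rw [List.cons_append, specLoop, if_neg (by simp [hc]), zero_mul, add_zero]
    exact ih (fun d hd => hm d (by simp [hd]))

-- a digit prefix folds into pending in the reference loop
lemma specLoop_digits (d : List Char) (rest : List Char) (total p : Int)
    (hd : ∀ c ∈ d, c.isDigit = true) :
    specLoop (d ++ rest) total p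
      = specLoop rest total (d.foldl (fun a c => 10 * a + ((c.toNat : Int) - 48)) p) := by
  induction d generalizing p with
  | nil => rfl
  | cons c t ih =>
    have hc : c.isDigit = true := hd c (by simp)
    rw [List.cons_append, specLoop, if_pos hc, List.foldl_cons]
    exact ih _ (fun e he => hd e (by simp [he]))

lemma pyRuns_nil : pyRuns [] = [] := by rw [pyRuns]

lemma pyRuns_cons (c : Char) (rest : List Char) :
    pyRuns (c :: rest)
      = (c.isDigit, c :: rest.takeWhile (fun d => d.isDigit = c.isDigit)) ::
          pyRuns (rest.dropWhile (fun d => d.isDigit = c.isDigit)) := by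
  rw [pyRuns]

-- B's runs-fold equals the reference loop (pending must be 0 before a digit run)
lemma runs_fold_eq_spec (n : ℕ) (l : List Char) (hn : l.length ≤ n) (total p : Int)
    (hp : ∀ c t, l = c :: t → c.isDigit = true → p = 0) :
    (((pyRuns l).foldl runStep (total, p)).1
      + ((pyRuns l).foldl runStep (total, p)).2 * 60)
      = specLoop l total p := by
  induction n generalizing l total p with
  | zero =>
    have : l = [] := by cases l with | nil => rfl | cons _ _ => simp at hn
    subst this; rw [pyRuns_nil]; rfl
  | succ n ih =>
    match l with
    | [] => rw [pyRuns_nil]; rfl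
    | c :: rest =>
      rw [pyRuns_cons, List.foldl_cons]
      have hsplit : rest.takeWhile (fun d => d.isDigit = c.isDigit)
          ++ rest.dropWhile (fun d => d.isDigit = c.isDigit) = rest :=
        List.takeWhile_append_dropWhile
      set run := rest.takeWhile (fun d => d.isDigit = c.isDigit) with hrun
      set rem := rest.dropWhile (fun d => d.isDigit = c.isDigit) with hrem
      have hlen : rem.length ≤ n := by
        have h1 : rem.length ≤ rest.length := List.length_dropWhile_le _ _
        have h2 : rest.length + 1 ≤ n + 1 := by simpa using hn
        omega
      have hremhead : ∀ c' t', rem = c' :: t' → ¬ (c'.isDigit = c.isDigit) := by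
        intro c' t' he
        have h3 := List.head?_dropWhile_not (fun d => decide (d.isDigit = c.isDigit)) rest
        rw [← hrem, he] at h3
        simpa using h3
      have hrunmem : ∀ d ∈ run, d.isDigit = c.isDigit := by
        intro d hd
        have := List.mem_takeWhile_imp hd
        simpa using this
      cases hbv : c.isDigit with
      | true =>
        -- numeric run: pending is overwritten by int('0' + run); p = 0 here
        have hp0 : p = 0 := hp c rest rfl hbv
        have hstep : runStep (total, p) (true, c :: run)
            = (total, pyIntDigits ('0' :: c :: run)) := by
          simp [runStep]
        rw [hstep]
        have hrh : ∀ c' t', rem = c' :: t' → c'.isDigit = true →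
            pyIntDigits ('0' :: c :: run) = 0 := by
          intro c' t' he hd
          have h4 := hremhead c' t' he
          rw [hbv] at h4
          exact absurd hd h4
        rw [ih rem hlen total _ hrh]
        conv_rhs => rw [← hsplit]
        rw [show specLoop (c :: (run ++ rem)) total p
            = specLoop (run ++ rem) total (10 * p + ((c.toNat : Int) - 48)) from by
          rw [specLoop, if_pos hbv]]
        rw [specLoop_digits run rem total _ (fun d hd => (hrunmem d hd).trans hbv), hp0]
        congr 1

      | false =>
        -- non-numeric run: flush pending with the first char's multiplier
        have hstep : runStep (total, p) (false, c :: run)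
            = (total + p * (if c = 'd' then 86400 else if c = 'h' then 3600
                            else if c = 's' then 1 else 60), 0) := by
          simp [runStep]
        rw [hstep, ih rem hlen _ 0 (fun _ _ _ _ => rfl)]
        conv_rhs => rw [← hsplit]
        rw [show specLoop (c :: (run ++ rem)) total p
            = specLoop (run ++ rem)
                (total + p * (if c = 'd' then 86400 else if c = 'h' then 3600
                              else if c = 's' then 1 else 60)) 0 from by
          rw [specLoop, if_neg (by simp [hbv])]]
        exact (specLoop_nondigit run rem _
          (fun d hd => (hrunmem d hd).trans hbv)).symm

-- ===== VERDICT (by name: the statement is the Claim_ definition above) =====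
theorem compute_time_format_spec : Claim_equal_compute_time_format := by
  intro s _
  unfold Spec_compute_time_format compute_time_format compute_time_format_alt
  rw [valid_eq]
  cases hc : ((!(s.toList.any Char.isDigit))
      || ((s.toList.zip s.toList.tail).any fun p => p.1 = '-' ∧ p.2.isDigit)) with
  | true =>
    simp
  | false =>
    have hA := ctfLoop_eq_spec s.toList 0 ['0']
    have h0 : pyIntDigits ['0'] = 0 := by decide
    rw [h0] at hA
    have hB := runs_fold_eq_spec s.toList.length s.toList le_rfl 0 0 (fun _ _ _ _ => rfl)
    rw [← hA] at hB
    simp only [Bool.not_false]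
    rw [if_neg (show ¬ (true = false) by simp), if_neg (show ¬ (false = true) by simp), hB]
    by_cases h2 : (ctfLoop s.toList 0 ['0']).2 = ['0']
    · rw [if_neg (by simp [h2]), h2, h0]
      ring
    · rw [if_pos h2]
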